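-- pv_equiv track=rewrite | github.com/NatTuck/scratch-2025-01 | 2370/23/demo.py | repeats_v1
-- ===== SOURCE A (Python) =====
-- def repeats_v1(xs: list[int]) -> list[int]:
--     """Do the thing described above."""
--
--     ys = []
--
--     for x in xs:
--         count = 0
--
--         for y in xs:
--             if x == y:
--                 count += 1
--
--         ys.append(count)
--
--     return ys
-- ===== SOURCE B (Python) =====
-- def _lower(sv, x, lo, hi):
--     # first index i in [lo, hi) with sv[i] >= x (hi if none)
--     while lo < hi:
--         mid = (lo + hi) // 2
--         if sv[mid] < x:
--             lo = mid + 1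
--         else:
--             hi = mid
--     return lo
--
--
-- def _upper(sv, x, lo, hi):
--     # first index i in [lo, hi) with sv[i] > x (hi if none)
--     while lo < hi:
--         mid = (lo + hi) // 2
--         if sv[mid] <= x:
--             lo = mid + 1
--         else:
--             hi = mid
--     return lo
--
--
-- def repeats_v1(xs: list[int]) -> list[int]:
--     """Do the thing described above."""
--     sv = sorted(xs)
--     n = len(sv)
--     ys = []
--     for x in xs:
--         left = _lower(sv, x, 0, n)
--         right = _upper(sv, x, left, n)
--         ys.append(right - left)
--     return ys
-- ===== Notes on version B (the rewrite author's own statement) =====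
-- stated objective: faster
-- what changed: Sorts a copy of the list once and obtains each element's count as the width of its run in the sorted list, located by two hand-written binary searches (lower/upper bound), instead of rescanning the whole list per element.
import Mathlib
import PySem

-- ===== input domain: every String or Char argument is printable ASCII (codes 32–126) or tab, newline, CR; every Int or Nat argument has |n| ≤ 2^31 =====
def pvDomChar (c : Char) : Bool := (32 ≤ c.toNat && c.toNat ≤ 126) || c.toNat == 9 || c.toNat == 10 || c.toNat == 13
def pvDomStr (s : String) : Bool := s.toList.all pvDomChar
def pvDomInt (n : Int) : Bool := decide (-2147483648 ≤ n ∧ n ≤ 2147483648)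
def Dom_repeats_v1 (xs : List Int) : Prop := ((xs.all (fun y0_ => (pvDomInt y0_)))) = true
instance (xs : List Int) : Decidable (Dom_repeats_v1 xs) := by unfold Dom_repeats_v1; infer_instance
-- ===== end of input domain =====

-- ===== PORT A =====
-- one honest line: B sorts a copy once and reads each count as the width of the element's
-- run in the sorted list, located by two binary searches, instead of A's full rescan per element.
def repeats_v1 (xs : List Int) : List Int :=
  xs.foldl (fun ys x =>
    ys ++ [xs.foldl (fun count y => if x == y then count + 1 else count) (0 : Int)]) []

-- ===== PORT B =====
-- port of Source B's _lower: first index i in [lo, hi) with sv[i] >= x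
def pvLower (sv : List Int) (x : Int) (lo hi : Nat) : Nat :=
  if _h : lo < hi then
    let mid := (lo + hi) / 2
    if sv.getD mid 0 < x then pvLower sv x (mid + 1) hi else pvLower sv x lo mid
  else lo
termination_by hi - lo
decreasing_by all_goals omega

-- port of Source B's _upper: first index i in [lo, hi) with sv[i] > x
def pvUpper (sv : List Int) (x : Int) (lo hi : Nat) : Nat :=
  if _h : lo < hi then
    let mid := (lo + hi) / 2
    if sv.getD mid 0 ≤ x then pvUpper sv x (mid + 1) hi else pvUpper sv x lo mid
  else lo
termination_by hi - lo
decreasing_by all_goals omega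

def repeats_v1_alt (xs : List Int) : List Int :=
  let sv := PySem.List.sorted xs (fun v => v) false
  let n := sv.length
  xs.foldl (fun ys x =>
    let left := pvLower sv x 0 n
    let right := pvUpper sv x left n
    ys ++ [(right : Int) - (left : Int)]) []

-- ===== PRECONDITION & SPEC =====
def Spec_repeats_v1 (xs : List Int) (out : List Int) : Prop := out = repeats_v1_alt xs
instance (xs : List Int) (out : List Int) : Decidable (Spec_repeats_v1 xs out) := by unfold Spec_repeats_v1; infer_instance

-- ===== CLAIM (what is proved, stated in full; the proofs are below) =====
def Claim_equal_repeats_v1 : Prop := ∀ (xs : List Int), Dom_repeats_v1 xs → Spec_repeats_v1 xs (repeats_v1 xs)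

-- ===== LEMMAS AND PROOFS =====

-- A's inner loop counts occurrences
lemma inner_count (xs : List Int) (x : Int) (c : Int) :
    xs.foldl (fun count y => if x == y then count + 1 else count) c = c + xs.count x := by
  induction xs generalizing c with
  | nil => simp
  | cons y ys ih =>
      simp only [List.foldl_cons, List.count_cons, ih]
      by_cases h : x = y
      · simp [h]; ring
      · have h' : ¬ (y = x) := fun e => h e.symm
        simp [h, h']

-- appending-one-element folds are maps
lemma foldl_append_map (l : List Int) (f : Int → Int) (acc : List Int) :
    l.foldl (fun ys x => ys ++ [f x]) acc = acc ++ l.map f := by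
  induction l generalizing acc with
  | nil => simp
  | cons x t ih => rw [List.foldl_cons, ih]; simp

-- sortedness gives index monotonicity (getD form)
lemma getD_mono (sv : List Int) (hs : sv.Pairwise (· ≤ ·)) {i j : Nat}
    (hij : i ≤ j) (hj : j < sv.length) : sv.getD i 0 ≤ sv.getD j 0 := by
  rcases eq_or_lt_of_le hij with rfl | hlt
  · exact le_refl _
  · have hi : i < sv.length := lt_trans hlt hj
    rw [List.getD_eq_getElem _ _ hi, List.getD_eq_getElem _ _ hj]
    exact List.pairwise_iff_getElem.mp hs i j hi hj hlt

-- generic spec for the binary-search loops: p is the Bool branch test, downward closed on sv.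
-- result r: everything below r passes p, everything in [r, len) fails p.
lemma lower_props_aux (sv : List Int) (x : Int) (hs : sv.Pairwise (· ≤ ·)) :
    ∀ n lo hi, hi - lo ≤ n → lo ≤ hi → hi ≤ sv.length →
      (∀ i, i < lo → sv.getD i 0 < x) →
      (∀ i, hi ≤ i → i < sv.length → ¬ sv.getD i 0 < x) →
      (∀ i, i < pvLower sv x lo hi → sv.getD i 0 < x) ∧
      (∀ i, pvLower sv x lo hi ≤ i → i < sv.length → ¬ sv.getD i 0 < x) ∧
      lo ≤ pvLower sv x lo hi ∧ pvLower sv x lo hi ≤ hi := by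
  intro n
  induction n with
  | zero =>
      intro lo hi hn hle hlen hbelow habove
      have heq : lo = hi := by omega
      rw [pvLower, dif_neg (by omega : ¬ lo < hi)]
      exact ⟨fun i hi' => hbelow i hi', fun i h1 h2 => habove i (by omega) h2, le_refl _, by omega⟩
  | succ n ih =>
      intro lo hi hn hle hlen hbelow habove
      by_cases hlh : lo < hi
      · rw [pvLower, dif_pos hlh]
        simp only []
        set mid := (lo + hi) / 2 with hmid
        have hmlt : mid < hi := by omega
        have hmlen : mid < sv.length := by omega
        by_cases htest : sv.getD mid 0 < x
        · rw [if_pos htest]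
          obtain ⟨a1, a2, a3, a4⟩ := ih (mid + 1) hi (by omega) (by omega) hlen
            (fun i hi' => lt_of_le_of_lt (getD_mono sv hs (by omega) hmlen) htest) habove
          exact ⟨a1, a2, by omega, a4⟩
        · rw [if_neg htest]
          obtain ⟨a1, a2, a3, a4⟩ := ih lo mid (by omega) (by omega) (by omega) hbelow
            (fun i h1 h2 hcon => htest (lt_of_le_of_lt (getD_mono sv hs h1 h2) hcon))
          exact ⟨a1, a2, a3, by omega⟩
      · rw [pvLower, dif_neg hlh]
        have heq : lo = hi := by omega
        exact ⟨fun i hi' => hbelow i hi', fun i h1 h2 => habove i (by omega) h2, le_refl _, by omega⟩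

lemma lower_props (sv : List Int) (x : Int) :
    ∀ lo hi, lo ≤ hi → hi ≤ sv.length →
      (∀ i, i < lo → sv.getD i 0 < x) →
      (∀ i, hi ≤ i → i < sv.length → ¬ sv.getD i 0 < x) →
      sv.Pairwise (· ≤ ·) →
      (∀ i, i < pvLower sv x lo hi → sv.getD i 0 < x) ∧
      (∀ i, pvLower sv x lo hi ≤ i → i < sv.length → ¬ sv.getD i 0 < x) ∧
      lo ≤ pvLower sv x lo hi ∧ pvLower sv x lo hi ≤ hi :=
  fun lo hi h1 h2 h3 h4 hs => lower_props_aux sv x hs (hi - lo) lo hi (le_refl _) h1 h2 h3 h4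

lemma upper_props_aux (sv : List Int) (x : Int) (hs : sv.Pairwise (· ≤ ·)) :
    ∀ n lo hi, hi - lo ≤ n → lo ≤ hi → hi ≤ sv.length →
      (∀ i, i < lo → sv.getD i 0 ≤ x) →
      (∀ i, hi ≤ i → i < sv.length → ¬ sv.getD i 0 ≤ x) →
      (∀ i, i < pvUpper sv x lo hi → sv.getD i 0 ≤ x) ∧
      (∀ i, pvUpper sv x lo hi ≤ i → i < sv.length → ¬ sv.getD i 0 ≤ x) ∧
      lo ≤ pvUpper sv x lo hi ∧ pvUpper sv x lo hi ≤ hi := by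
  intro n
  induction n with
  | zero =>
      intro lo hi hn hle hlen hbelow habove
      rw [pvUpper, dif_neg (by omega : ¬ lo < hi)]
      exact ⟨fun i hi' => hbelow i hi', fun i h1 h2 => habove i (by omega) h2, le_refl _, by omega⟩
  | succ n ih =>
      intro lo hi hn hle hlen hbelow habove
      by_cases hlh : lo < hi
      · rw [pvUpper, dif_pos hlh]
        simp only []
        set mid := (lo + hi) / 2 with hmid
        have hmlt : mid < hi := by omega
        have hmlen : mid < sv.length := by omega
        by_cases htest : sv.getD mid 0 ≤ x
        · rw [if_pos htest]
          obtain ⟨a1, a2, a3, a4⟩ := ih (mid + 1) hi (by omega) (by omega) hlen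
            (fun i hi' => le_trans (getD_mono sv hs (by omega) hmlen) htest) habove
          exact ⟨a1, a2, by omega, a4⟩
        · rw [if_neg htest]
          obtain ⟨a1, a2, a3, a4⟩ := ih lo mid (by omega) (by omega) (by omega) hbelow
            (fun i h1 h2 hcon => htest (le_trans (getD_mono sv hs h1 h2) hcon))
          exact ⟨a1, a2, a3, by omega⟩
      · rw [pvUpper, dif_neg hlh]
        exact ⟨fun i hi' => hbelow i hi', fun i h1 h2 => habove i (by omega) h2, le_refl _, by omega⟩

lemma upper_props (sv : List Int) (x : Int) :
    ∀ lo hi, lo ≤ hi → hi ≤ sv.length →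
      (∀ i, i < lo → sv.getD i 0 ≤ x) →
      (∀ i, hi ≤ i → i < sv.length → ¬ sv.getD i 0 ≤ x) →
      sv.Pairwise (· ≤ ·) →
      (∀ i, i < pvUpper sv x lo hi → sv.getD i 0 ≤ x) ∧
      (∀ i, pvUpper sv x lo hi ≤ i → i < sv.length → ¬ sv.getD i 0 ≤ x) ∧
      lo ≤ pvUpper sv x lo hi ∧ pvUpper sv x lo hi ≤ hi :=
  fun lo hi h1 h2 h3 h4 hs => upper_props_aux sv x hs (hi - lo) lo hi (le_refl _) h1 h2 h3 h4

-- a prefix-closed split point is the countP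
lemma countP_of_split (sv : List Int) (p : Int → Bool) (r : Nat) (hr : r ≤ sv.length)
    (h1 : ∀ i, i < r → p (sv.getD i 0) = true)
    (h2 : ∀ i, r ≤ i → i < sv.length → p (sv.getD i 0) = false) :
    sv.countP p = r := by
  have hsplit : sv = sv.take r ++ sv.drop r := (List.take_append_drop r sv).symm
  rw [hsplit, List.countP_append]
  have htake : (sv.take r).countP p = (sv.take r).length := by
    apply List.countP_eq_length.mpr
    intro a ha
    obtain ⟨i, hilt, hget⟩ := List.mem_iff_getElem.mp ha
    have hir : i < r := by
      have := List.length_take_le r sv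
      have h2 := hilt; rw [List.length_take] at h2; omega
    have hil : i < sv.length := by omega
    have : a = sv.getD i 0 := by
      rw [List.getD_eq_getElem _ _ hil, ← hget, List.getElem_take]
    rw [this]; exact h1 i hir
  have hdrop : (sv.drop r).countP p = 0 := by
    apply List.countP_eq_zero.mpr
    intro a ha
    obtain ⟨i, hilt, hget⟩ := List.mem_iff_getElem.mp ha
    have hlen : (sv.drop r).length = sv.length - r := List.length_drop
    have hil : r + i < sv.length := by omega
    have : a = sv.getD (r + i) 0 := by
      rw [List.getD_eq_getElem _ _ hil, ← hget, List.getElem_drop]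
    rw [this]
    simp only [h2 (r + i) (by omega) hil]
    exact Bool.false_ne_true
  rw [htake, hdrop, List.length_take]
  omega

lemma outer_map (xs l : List Int) (acc : List Int) :
    l.foldl (fun ys x =>
      ys ++ [xs.foldl (fun count y => if x == y then count + 1 else count) (0 : Int)]) acc
    = acc ++ l.map (fun x => (xs.count x : Int)) := by
  induction l generalizing acc with
  | nil => simp
  | cons x t ih => rw [List.foldl_cons, ih, inner_count]; simp

lemma countP_le_split (x : Int) (l : List Int) :
    l.countP (fun y => decide (y ≤ x)) = l.countP (fun y => decide (y < x)) + l.count x := by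
  induction l with
  | nil => simp
  | cons y t ih =>
      simp only [List.countP_cons, List.count_cons, ih]
      by_cases h1 : y ≤ x <;> by_cases h2 : y < x <;> by_cases h3 : y = x <;>
        simp [h1, h2, h3] <;> omega

-- ===== VERDICT (by name: the statement is the Claim_ definition above) =====
theorem repeats_v1_spec : Claim_equal_repeats_v1 := by
  intro xs _
  unfold Spec_repeats_v1 repeats_v1 repeats_v1_alt
  simp only []
  set sv := PySem.List.sorted xs (fun v => v) false with hsv
  have hs : sv.Pairwise (· ≤ ·) := PySem.List.sorted_pairwise xs (fun v => v)
  have hperm : sv.Perm xs := PySem.List.sorted_perm xs (fun v => v) false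
  have hmap : xs.foldl (fun ys x =>
      ys ++ [xs.foldl (fun count y => if x == y then count + 1 else count) (0 : Int)]) []
      = xs.map (fun x => (xs.count x : Int)) := by
    simpa using outer_map xs xs []
  have hmapB : xs.foldl (fun ys x =>
      let left := pvLower sv x 0 sv.length
      let right := pvUpper sv x left sv.length
      ys ++ [(right : Int) - (left : Int)]) []
      = xs.map (fun x =>
          ((pvUpper sv x (pvLower sv x 0 sv.length) sv.length : Int)
            - (pvLower sv x 0 sv.length : Int))) := by
    have := foldl_append_map xs (fun x =>
      ((pvUpper sv x (pvLower sv x 0 sv.length) sv.length : Int)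
        - (pvLower sv x 0 sv.length : Int))) []
    simpa using this
  rw [hmap, hmapB]
  apply List.map_congr_left
  intro x _
  have hL := lower_props sv x 0 sv.length (Nat.zero_le _) (le_refl _)
    (by omega) (by intro i h1 h2; omega) hs
  obtain ⟨hL1, hL2, _, hLle⟩ := hL
  set left := pvLower sv x 0 sv.length with hleft
  have hlcount : sv.countP (fun y => decide (y < x)) = left := by
    apply countP_of_split sv _ left hLle
    · intro i hi; simpa using hL1 i hi
    · intro i h1 h2; simpa using hL2 i h1 h2
  have hU := upper_props sv x left sv.length hLle (le_refl _)
    (by intro i hi; exact le_of_lt (hL1 i hi))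
    (by intro i h1 h2; omega) hs
  obtain ⟨hU1, hU2, _, hUle⟩ := hU
  set right := pvUpper sv x left sv.length with hright
  have hrcount : sv.countP (fun y => decide (y ≤ x)) = right := by
    apply countP_of_split sv _ right hUle
    · intro i hi; simpa using hU1 i hi
    · intro i h1 h2; simpa using hU2 i h1 h2
  have hsplit := countP_le_split x sv
  have hcnt : sv.count x = xs.count x := hperm.count_eq x
  rw [hlcount, hrcount, hcnt] at hsplit
  omega
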